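-- pv_equiv track=rewrite | github.com/peterch405/BabrahamLinkON | babrahamlinkon/deduplicate.py | add_at_hypens
-- ===== SOURCE A (Python) =====
-- def add_at_hypens(hypen_str, str_add, sym_to_add):
--     '''add_at_hypens('ATATGAGATA-A', '>>>>>>>>>>>', '#')
--     produces '>>>>>>>>>>#>'
--     '''
--     fill_pos = [i for i, x in enumerate(hypen_str) if x == '-']
--     count = 0
--     added = 0
--     new_str = ''
--     for p in range(len(str_add)+len(fill_pos)):
--         if count in fill_pos:
--             new_str += sym_to_add
--             added += 1
--         else:
--             new_str += str_add[p-added]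
--         count += 1
--     return new_str
-- ===== SOURCE B (Python) =====
-- def add_at_hypens(hypen_str, str_add, sym_to_add):
--     # Chunked rewrite: one pass over hypen_str; at each hyphen, append the
--     # whole slice of str_add consumed since the previous hyphen plus the
--     # symbol; finally append the remainder of str_add.
--     parts = []
--     prev = 0
--     k = 0
--     for i, c in enumerate(hypen_str):
--         if c == '-':
--             parts.append(str_add[prev:i - k])
--             parts.append(sym_to_add)
--             prev = i - k
--             k += 1
--     parts.append(str_add[prev:])
--     return ''.join(parts)
-- ===== Notes on version B (the rewrite author's own statement) =====
-- stated objective: faster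
-- what changed: A walks every output position one character at a time, testing 'count in fill_pos' with a list scan and concatenating one character per step; B instead makes a single pass over hypen_str and emits whole slices of str_add between consecutive hyphens, joining the chunks at the end.
import Mathlib
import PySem

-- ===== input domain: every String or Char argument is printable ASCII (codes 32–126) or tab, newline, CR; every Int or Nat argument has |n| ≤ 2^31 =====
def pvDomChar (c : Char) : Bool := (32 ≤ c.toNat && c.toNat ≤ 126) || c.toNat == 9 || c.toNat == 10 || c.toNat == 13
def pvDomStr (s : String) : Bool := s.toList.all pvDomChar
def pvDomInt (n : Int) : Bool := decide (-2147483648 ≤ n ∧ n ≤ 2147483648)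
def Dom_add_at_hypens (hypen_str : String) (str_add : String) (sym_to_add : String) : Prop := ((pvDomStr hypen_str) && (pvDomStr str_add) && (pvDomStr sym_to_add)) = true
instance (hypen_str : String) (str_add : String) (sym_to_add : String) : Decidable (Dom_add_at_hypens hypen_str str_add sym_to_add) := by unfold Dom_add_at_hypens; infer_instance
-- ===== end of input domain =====

-- B replaces A's per-output-character loop (with a list-membership test at every step) by a
-- single pass over hypen_str that emits whole slices of str_add between consecutive hyphens.
-- Where A raises IndexError (a hyphen too far right for str_add), B returns the chunked string.

-- ===== PORT A =====
-- fill_pos = [i for i, x in enumerate(hypen_str) if x == '-']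
def fillPos_A (l : List Char) : List Int :=
  (PySem.List.enumerate l 0).filterMap (fun ic => if ic.2 = '-' then some ic.1 else none)

-- one iteration of A's 'for p in range(...)' loop; state = (count, added, new_str)
def stepA (fill_pos : List Int) (s sym : List Char) (st : Int × Int × List Char) (p : Int) :
    Int × Int × List Char :=
  if st.1 ∈ fill_pos then (st.1 + 1, st.2.1 + 1, st.2.2 ++ sym)
  else (st.1 + 1, st.2.1, st.2.2 ++ [PySem.List.pyGetD s (p - st.2.1) '?'])

def add_at_hypens (hypen_str : String) (str_add : String) (sym_to_add : String) : String :=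
  let fill_pos := fillPos_A hypen_str.toList
  let n : Int := (str_add.toList.length : Int) + (fill_pos.length : Int)
  let res := (PySem.List.pyRange 0 n 1).foldl (stepA fill_pos str_add.toList sym_to_add.toList)
      (0, 0, [])
  String.ofList res.2.2

-- ===== PORT B =====
-- one iteration of B's 'for i, c in enumerate(hypen_str)' loop; state = (parts, prev, k)
def stepB (s sym : List Char) (st : List (List Char) × Int × Int) (ic : Int × Char) :
    List (List Char) × Int × Int :=
  if ic.2 = '-' then
    (st.1 ++ [PySem.List.slice s (some st.2.1) (some (ic.1 - st.2.2)), sym], ic.1 - st.2.2,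
      st.2.2 + 1)
  else st

def add_at_hypens_alt (hypen_str : String) (str_add : String) (sym_to_add : String) : String :=
  let st := (PySem.List.enumerate hypen_str.toList 0).foldl
      (stepB str_add.toList sym_to_add.toList) ([], 0, 0)
  String.ofList (PySem.Chars.join []
      (st.1 ++ [PySem.List.slice str_add.toList (some st.2.1) none]))

-- ===== PRECONDITION & SPEC =====
-- Pre_ excludes exactly the inputs where A raises IndexError on str_add[p-added]: some hyphen
-- index i exceeds len(str_add) + (number of hyphens before i).
def Pre_add_at_hypens (hypen_str : String) (str_add : String) (sym_to_add : String) : Prop :=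
  ∀ i : Nat, i < hypen_str.toList.length → hypen_str.toList.getD i ' ' = '-' →
    i ≤ str_add.toList.length + (hypen_str.toList.take i).count '-'
instance (hypen_str : String) (str_add : String) (sym_to_add : String) :
    Decidable (Pre_add_at_hypens hypen_str str_add sym_to_add) := by
  unfold Pre_add_at_hypens; infer_instance

def pvWitness_add_at_hypens : String × String × String := ("ATATGAGATA-A", ">>>>>>>>>>>", "#")

def Spec_add_at_hypens (hypen_str : String) (str_add : String) (sym_to_add : String)
    (out : String) : Prop := out = add_at_hypens_alt hypen_str str_add sym_to_add
instance (hypen_str : String) (str_add : String) (sym_to_add : String) (out : String) :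
    Decidable (Spec_add_at_hypens hypen_str str_add sym_to_add out) := by
  unfold Spec_add_at_hypens; infer_instance

-- ===== CLAIM (what is proved, stated in full; the proofs are below) =====
def Claim_equal_add_at_hypens : Prop := ∀ (hypen_str : String) (str_add : String) (sym_to_add : String), Dom_add_at_hypens hypen_str str_add sym_to_add → Pre_add_at_hypens hypen_str str_add sym_to_add → Spec_add_at_hypens hypen_str str_add sym_to_add (add_at_hypens hypen_str str_add sym_to_add)


-- ===== LEMMAS AND PROOFS =====

-- the canonical chunk step B performs at each hyphen position q
def stepC (s sym : List Char) (st : List (List Char) × Int × Int) (q : Int) :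
    List (List Char) × Int × Int :=
  (st.1 ++ [PySem.List.slice s (some st.2.1) (some (q - st.2.2)), sym], q - st.2.2, st.2.2 + 1)

-- the string A's loop has built after the first m iterations
def bufA (ps : List Int) (s sym : List Char) : Nat → List Char
  | 0 => []
  | (m+1) => bufA ps s sym m ++
      (if ((m : Nat) : Int) ∈ ps then sym
       else [PySem.List.pyGetD s ((m : Int) - (ps.countP (fun q => decide (q < (m : Int))) : Int)) '?'])

lemma fillPos_append (l : List Char) (c : Char) :
    fillPos_A (l ++ [c]) = fillPos_A l ++ (if c = '-' then [((l.length : Nat) : Int)] else []) := by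
  unfold fillPos_A
  rw [PySem.List.enumerate_append, List.filterMap_append]
  congr 1
  by_cases hc : c = '-' <;> simp [hc, PySem.List.enumerate_cons, PySem.List.enumerate_nil, List.filterMap_cons]

lemma fillPos_mem_bounds (l : List Char) : ∀ q ∈ fillPos_A l, 0 ≤ q ∧ q < (l.length : Int) := by
  intro q hq
  unfold fillPos_A at hq
  simp only [List.mem_filterMap] at hq
  obtain ⟨ic, hic, hif⟩ := hq
  rw [PySem.List.mem_enumerate_iff] at hic
  obtain ⟨k, hk, rfl⟩ := hic
  by_cases hc : (l[k] = '-') <;> simp [hc] at hif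
  subst hif
  constructor <;> [positivity; exact_mod_cast hk]

lemma fillPos_pairwise (l : List Char) : (fillPos_A l).Pairwise (· < ·) := by
  induction l using List.reverseRecOn with
  | nil => simp [fillPos_A, PySem.List.enumerate_nil]
  | append_singleton l c ih =>
    rw [fillPos_append, List.pairwise_append]
    refine ⟨ih, by split <;> simp, ?_⟩
    intro x hx y hy
    have := (fillPos_mem_bounds l x hx).2
    rcases (by split at hy <;> simp_all : y = ((l.length : Nat) : Int)) with rfl
    omega

lemma fillPos_count (l : List Char) : (fillPos_A l).length = l.count '-' := by
  induction l using List.reverseRecOn with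
  | nil => simp [fillPos_A, PySem.List.enumerate_nil]
  | append_singleton l c ih =>
    rw [fillPos_append]
    by_cases hc : c = '-' <;> simp [hc, ih, List.count_append]

lemma fillPos_bound (l s : List Char)
    (hpre : ∀ i : Nat, i < l.length → l.getD i ' ' = '-' → i ≤ s.length + (l.take i).count '-') :
    ∀ k (hk : k < (fillPos_A l).length), (fillPos_A l)[k] ≤ (s.length : Int) + k := by
  induction l using List.reverseRecOn with
  | nil => intro k hk; simp [fillPos_A, PySem.List.enumerate_nil] at hk
  | append_singleton l c ih =>
    have hpre' : ∀ i : Nat, i < l.length → l.getD i ' ' = '-' →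
        i ≤ s.length + (l.take i).count '-' := by
      intro i hi hc
      have h1 := hpre i (by simp; omega)
      rw [List.getD_append _ _ _ _ hi, List.take_append_of_le_length (by omega)] at h1
      exact h1 hc
    intro k hk
    simp only [fillPos_append] at hk ⊢
    by_cases hc : c = '-'
    · simp only [hc, if_pos rfl] at hk ⊢
      rcases Nat.lt_or_ge k (fillPos_A l).length with h | h
      · rw [List.getElem_append_left h]; exact ih hpre' k h
      · have hkl : k = (fillPos_A l).length := by simp at hk; omega
        subst hkl
        rw [List.getElem_append_right (le_refl _)]
        simp only [Nat.sub_self]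
        have h2 := hpre l.length (by simp) (by
          rw [List.getD_append_right _ _ _ _ (le_refl _)]; simpa using hc)
        rw [List.take_left] at h2
        have h3 := fillPos_count l
        simp only [if_true, List.getElem_singleton]
        push_cast [h3]
        omega
    · simp only [hc, if_false, List.append_nil] at hk ⊢
      exact ih hpre' k hk

lemma B_state (l s sym : List Char) :
    (PySem.List.enumerate l 0).foldl (stepB s sym) ([], 0, 0) =
      (fillPos_A l).foldl (stepC s sym) ([], 0, 0) := by
  induction l using List.reverseRecOn with
  | nil => simp [fillPos_A, PySem.List.enumerate_nil]
  | append_singleton l c ih =>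
    rw [PySem.List.enumerate_append, fillPos_append, List.foldl_append, List.foldl_append, ih]
    by_cases hc : c = '-' <;>
      simp [hc, PySem.List.enumerate_cons, PySem.List.enumerate_nil, stepB, stepC]

lemma stC_k (s sym : List Char) :
    ∀ (ps : List Int) (init : List (List Char) × Int × Int),
      (ps.foldl (stepC s sym) init).2.2 = init.2.2 + ps.length := by
  intro ps
  induction ps with
  | nil => simp
  | cons q t ih => intro init; rw [List.foldl_cons, ih]; simp [stepC]; omega

lemma countP_lt_succ (ps : List Int) (m : Nat) (hnd : ps.Nodup) :
    ps.countP (fun q => decide (q < (m : Int) + 1)) =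
      ps.countP (fun q => decide (q < (m : Int))) + (if ((m : Nat) : Int) ∈ ps then 1 else 0) := by
  induction ps with
  | nil => simp
  | cons a t ih =>
    rw [List.nodup_cons] at hnd
    rw [List.countP_cons, List.countP_cons, ih hnd.2]
    by_cases ha : a = (m : Int)
    · subst ha
      simp only [List.mem_cons, true_or, if_pos, hnd.1, if_neg, decide_eq_true_eq]
      norm_num
    · by_cases hm : ((m : Nat) : Int) ∈ t <;> by_cases hlt : a < (m : Int) <;>
        simp only [List.mem_cons, ha, hm, hlt, if_true, if_false, or_true, or_false,
          decide_true, decide_false, false_or, decide_eq_true_eq] <;> split_ifs <;> simp_all <;> omega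

lemma A_loop (ps : List Int) (s sym : List Char) (hnd : ps.Nodup)
    (hnn : ∀ q ∈ ps, 0 ≤ q) (m : Nat) :
    (PySem.List.pyRange 0 ((m : Nat) : Int) 1).foldl (stepA ps s sym) (0, 0, []) =
      (((m : Nat) : Int), ((ps.countP (fun q => decide (q < (m : Int))) : Nat) : Int),
        bufA ps s sym m) := by
  induction m with
  | zero =>
    rw [PySem.List.pyRange_one_eq_nil (by norm_num)]
    have h0 : ps.countP (fun q => decide (q < (0 : Int))) = 0 := by
      rw [List.countP_eq_zero]
      intro q hq
      simpa using not_lt.mpr (hnn q hq)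
    simp [bufA]
    simp [h0]
  | succ m ih =>
    have hcast : (((m+1 : Nat)) : Int) = ((m : Nat) : Int) + 1 := by push_cast; ring
    rw [hcast, PySem.List.pyRange_one_succ_right (by positivity), List.foldl_append, ih]
    rw [List.foldl_cons, List.foldl_nil]
    rw [countP_lt_succ ps m hnd]
    by_cases hm : ((m : Nat) : Int) ∈ ps
    · simp only [stepA, hm, if_pos, if_true, bufA]
      refine Prod.ext rfl (Prod.ext ?_ ?_) <;> simp [hm] <;> push_cast <;> ring
    · simp only [stepA, hm, if_neg, if_false, bufA, not_false_iff]
      refine Prod.ext rfl (Prod.ext ?_ ?_) <;> simp [hm]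

lemma ge_of_pairwise : ∀ (ps : List Int) (c : Int), ps.Pairwise (· < ·) → (∀ x ∈ ps, c ≤ x) →
    ∀ k (hk : k < ps.length), c + k ≤ ps[k] := by
  intro ps
  induction ps with
  | nil => intro c _ _ k hk; simp at hk
  | cons a t ih =>
    intro c hpw hge k hk
    rw [List.pairwise_cons] at hpw
    match k with
    | 0 => simpa using hge a (List.mem_cons_self)
    | (k+1) =>
      have := ih (a+1) hpw.2 (fun x hx => by have := hpw.1 x hx; omega) k (by simpa using hk)
      have hca : c ≤ a := hge a (List.mem_cons_self)
      simp only [List.getElem_cons_succ]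
      push_cast
      omega

lemma bufA_prefix (s sym : List Char) (qs : List Int) (q : Int) :
    ∀ j : Nat, (j : Int) ≤ q → bufA (qs ++ [q]) s sym j = bufA qs s sym j := by
  intro j
  induction j with
  | zero => intro _; rfl
  | succ j ih =>
    intro hj
    have hj' : ((j : Nat) : Int) < q := by push_cast at hj ⊢; omega
    have hmem : (((j : Nat) : Int) ∈ qs ++ [q]) ↔ ((j : Nat) : Int) ∈ qs := by
      simp only [List.mem_append, List.mem_singleton]
      constructor
      · rintro (h | h)
        · exact h
        · exact absurd h (by omega)
      · exact Or.inl
    have hcnt : (qs ++ [q]).countP (fun x => decide (x < ((j:Nat) : Int))) =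
        qs.countP (fun x => decide (x < ((j:Nat) : Int))) := by
      rw [List.countP_append]
      simp only [List.countP_singleton]
      have : ¬ (q < ((j:Nat) : Int)) := by omega
      simp [this]
    simp only [bufA, hmem, hcnt, ih (by omega)]

lemma bufA_nil (s sym : List Char) : ∀ m : Nat, m ≤ s.length → bufA [] s sym m = s.take m := by
  intro m
  induction m with
  | zero => intro _; simp [bufA]
  | succ m ih =>
    intro hm
    have hms : m < s.length := by omega
    simp only [bufA, List.not_mem_nil, if_neg, List.countP_nil, Nat.cast_zero, sub_zero,
      not_false_iff]
    rw [ih (by omega), PySem.List.pyGetD_natCast, List.take_succ]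
    congr 1
    rw [List.getD_eq_getElem s '?' hms, List.getElem?_eq_getElem hms]
    rfl

lemma join_nil_flatten (parts : List (List Char)) :
    PySem.Chars.join [] parts = parts.flatten := by
  induction parts with
  | nil => simp [PySem.Chars.join_nil]
  | cons a t ih =>
    match t with
    | [] => simp [PySem.Chars.join_singleton]
    | b :: t' =>
      rw [PySem.Chars.join_cons_cons, List.flatten_cons, ih]
      simp

lemma chunk_main (s sym : List Char) :
    ∀ ps : List Int, ps.Pairwise (· < ·) → (∀ q ∈ ps, 0 ≤ q) →
      (∀ k (hk : k < ps.length), ps[k] ≤ (s.length : Int) + k) →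
      ∀ m : Nat, (∀ x ∈ ps, x < (m : Int)) → m ≤ s.length + ps.length →
        0 ≤ (ps.foldl (stepC s sym) ([], 0, 0)).2.1 ∧
        (ps.foldl (stepC s sym) ([], 0, 0)).2.1 ≤ (m : Int) - ps.length ∧
        bufA ps s sym m = (ps.foldl (stepC s sym) ([], 0, 0)).1.flatten ++
          (s.drop (ps.foldl (stepC s sym) ([], 0, 0)).2.1.toNat).take
            (m - ps.length - (ps.foldl (stepC s sym) ([], 0, 0)).2.1.toNat) := by
  intro ps
  induction ps using List.reverseRecOn with
  | nil =>
    intro _ _ _ m _ hm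
    refine ⟨le_refl 0, by simpa using (by positivity : (0:Int) ≤ (m:Int)), ?_⟩
    simpa using bufA_nil s sym m (by simpa using hm)
  | append_singleton qs q ih =>
    intro hpw hnn hbd m hmall hm
    have hpw' : qs.Pairwise (· < ·) := (List.pairwise_append.mp hpw).1
    have hqlt : ∀ x ∈ qs, x < q := by
      intro x hx
      exact (List.pairwise_append.mp hpw).2.2 x hx q (List.mem_singleton.mpr rfl)
    have hq0 : 0 ≤ q := hnn q (by simp)
    have hnn' : ∀ x ∈ qs, 0 ≤ x := fun x hx => hnn x (by simp [hx])
    have hbd' : ∀ k (hk : k < qs.length), qs[k] ≤ (s.length : Int) + k := by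
      intro k hk
      have := hbd k (by simp; omega)
      rwa [List.getElem_append_left hk] at this
    have hqbd : q ≤ (s.length : Int) + qs.length := by
      have hb := hbd qs.length (by simp)
      rw [List.getElem_append_right (le_refl _)] at hb
      simp at hb
      exact hb
    have hqge : (qs.length : Int) ≤ q := by
      have hge := ge_of_pairwise (qs ++ [q]) 0 hpw (fun x hx => hnn x hx) qs.length (by simp)
      rw [List.getElem_append_right (le_refl _)] at hge
      simp at hge
      omega
    have hqm : q < (m : Int) := hmall q (by simp)
    set st' := qs.foldl (stepC s sym) ([], 0, 0) with hst'
    have hk' : st'.2.2 = (qs.length : Int) := by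
      rw [hst', stC_k]; simp
    have hstep : (qs ++ [q]).foldl (stepC s sym) ([], 0, 0) =
        (st'.1 ++ [PySem.List.slice s (some st'.2.1) (some (q - (qs.length : Int))), sym],
          q - (qs.length : Int), (qs.length : Int) + 1) := by
      rw [List.foldl_append, List.foldl_cons, List.foldl_nil, ← hst']
      simp [stepC, hk']
    have hq_toNat : ((q.toNat : Nat) : Int) = q := Int.toNat_of_nonneg hq0
    have ihq := ih hpw' hnn' hbd' q.toNat
      (fun x hx => by rw [hq_toNat]; exact hqlt x hx)
      (by omega)
    obtain ⟨hp0, hpbd, hbufq⟩ := ihq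
    set prev' := st'.2.1 with hprev'
    have hpbd' : prev' ≤ q - (qs.length : Int) := by omega
    have hnew0 : (0:Int) ≤ q - (qs.length : Int) := by omega
    have hnewNat : (q - (qs.length : Int)).toNat = q.toNat - qs.length := by omega
    rw [hstep]
    dsimp only
    have hm2 : m ≤ s.length + (qs.length + 1) := by simpa using hm
    refine ⟨hnew0, by simp; push_cast; omega, ?_⟩
    have key : ∀ m' : Nat, q.toNat + 1 ≤ m' → m' ≤ s.length + qs.length + 1 →
        bufA (qs ++ [q]) s sym m' =
          (st'.1 ++ [PySem.List.slice s (some prev') (some (q - (qs.length : Int))), sym]).flatten ++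
          (s.drop (q.toNat - qs.length)).take (m' - (qs.length + 1) - (q.toNat - qs.length)) := by
      intro m' hm'
      induction m', hm' using Nat.le_induction with
      | base =>
        intro _
        have htake0 : q.toNat + 1 - (qs.length + 1) - (q.toNat - qs.length) = 0 := by omega
        rw [htake0]
        simp only [List.take_zero, List.append_nil, bufA]
        have hmem : ((q.toNat : Nat) : Int) ∈ qs ++ [q] := by rw [hq_toNat]; simp
        rw [if_pos hmem, bufA_prefix s sym qs q q.toNat (by omega), hbufq]
        have hslice : PySem.List.slice s (some prev') (some (q - (qs.length : Int))) =
            (s.drop prev'.toNat).take (q.toNat - qs.length - prev'.toNat) := by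
          rw [PySem.List.slice_toNat s hp0 hnew0, hnewNat]
        rw [hslice]
        simp [List.flatten_append]
      | succ m' hm' ihm =>
        intro hm'1
        have hrec := ihm (by omega)
        simp only [bufA, hrec]
        have hnotmem : ¬ (((m' : Nat) : Int) ∈ qs ++ [q]) := by
          intro hmem
          rcases List.mem_append.mp hmem with h | h
          · have := hqlt _ h; omega
          · simp at h; omega
        rw [if_neg hnotmem]
        have hcntall : (qs ++ [q]).countP (fun x => decide (x < ((m' : Nat) : Int))) =
            qs.length + 1 := by
          have hall : ∀ x ∈ qs ++ [q], (fun x => decide (x < ((m' : Nat) : Int))) x = true := by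
            intro x hx
            rcases List.mem_append.mp hx with h | h
            · have := hqlt _ h; simp; omega
            · simp at h; subst h; simp; omega
          rw [List.countP_eq_length.mpr hall]; simp
        rw [hcntall]
        have hidx : ((m' : Nat) : Int) - (((qs.length + 1 : Nat)) : Int) =
            (((m' - qs.length - 1 : Nat)) : Int) := by push_cast; omega
        rw [hidx, PySem.List.pyGetD_natCast]
        have hlt : m' - qs.length - 1 < s.length := by omega
        have htksucc : m' + 1 - (qs.length + 1) - (q.toNat - qs.length) =
            (m' - (qs.length + 1) - (q.toNat - qs.length)) + 1 := by omega
        rw [htksucc, List.take_succ, List.append_assoc]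
        congr 2
        rw [List.getElem?_drop]
        have hix2 : q.toNat - qs.length + (m' - (qs.length + 1) - (q.toNat - qs.length)) =
            m' - qs.length - 1 := by omega
        rw [hix2, List.getElem?_eq_getElem hlt, List.getD_eq_getElem s '?' hlt]
        rfl
    have hfin := key m (by omega) (by omega)
    rw [hfin, hnewNat]
    congr 2
    simp

-- ===== VERDICT (by name: the statement is the Claim_ definition above) =====

theorem add_at_hypens_spec : Claim_equal_add_at_hypens := by
  intro h s sym hdom hpre
  unfold Spec_add_at_hypens
  simp only [add_at_hypens, add_at_hypens_alt]
  have hpw := fillPos_pairwise h.toList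
  have hnn : ∀ q ∈ fillPos_A h.toList, (0:Int) ≤ q :=
    fun q hq => (fillPos_mem_bounds h.toList q hq).1
  have hnd : (fillPos_A h.toList).Nodup := hpw.imp (fun hlt => ne_of_lt hlt)
  have hbd := fillPos_bound h.toList s.toList hpre
  set ps := fillPos_A h.toList with hps
  set L := s.toList.length with hL
  have hcast : (L : Int) + (ps.length : Int) = (((L + ps.length : Nat)) : Int) := by push_cast; ring
  have hmall : ∀ x ∈ ps, x < (((L + ps.length : Nat)) : Int) := by
    intro x hx
    obtain ⟨k, hk, rfl⟩ := List.mem_iff_getElem.mp hx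
    have := hbd k hk
    push_cast
    omega
  obtain ⟨hp0, hpbd, hbuf⟩ :=
    chunk_main s.toList sym.toList ps hpw hnn hbd (L + ps.length) hmall (le_refl _)
  rw [hcast, A_loop ps s.toList sym.toList hnd hnn (L + ps.length)]
  rw [B_state h.toList s.toList sym.toList, ← hps]
  dsimp only
  rw [hbuf, join_nil_flatten, List.flatten_append]
  congr 1
  simp only [List.flatten_cons, List.flatten_nil, List.append_nil]
  rw [PySem.List.slice_from s.toList hp0]
  rw [List.take_of_length_le]
  rw [List.length_drop]
  omega
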